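-- pv_equiv track=rewrite | github.com/S-S-Belousov/PytonSeminarHomeWork5 | function.py | decoding_text
-- ===== SOURCE A (Python) =====
-- def decoding_text(text):
--     code_list = []
--     char_count = ''
--     for i in range(0, len(text)):
--         if text[i].isdigit():
--             char_count += text[i]
--         else:
--             code_list.append(text[i]*int(char_count))
--             char_count = ''
--     return ''.join(code_list)
-- ===== SOURCE B (Python) =====
-- def decoding_text(text):
--     pieces = []
--     i, n = 0, len(text)
--     while i < n:
--         j = i
--         while j < n and text[j].isdigit():
--             j += 1
--         if j == n:
--             break
--         pieces.append(text[j] * int(text[i:j]))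
--         i = j + 1
--     return ''.join(pieces)
-- ===== Notes on version B (the rewrite author's own statement) =====
-- stated objective: alternative
-- what changed: B replaces A's per-character branch with a digit-string accumulator by a tokenizing scan: it repeatedly reads a maximal digit run with an inner index loop, slices it out, and emits the following character repeated int(run) times, so no accumulator string is carried or reset.
import Mathlib
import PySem

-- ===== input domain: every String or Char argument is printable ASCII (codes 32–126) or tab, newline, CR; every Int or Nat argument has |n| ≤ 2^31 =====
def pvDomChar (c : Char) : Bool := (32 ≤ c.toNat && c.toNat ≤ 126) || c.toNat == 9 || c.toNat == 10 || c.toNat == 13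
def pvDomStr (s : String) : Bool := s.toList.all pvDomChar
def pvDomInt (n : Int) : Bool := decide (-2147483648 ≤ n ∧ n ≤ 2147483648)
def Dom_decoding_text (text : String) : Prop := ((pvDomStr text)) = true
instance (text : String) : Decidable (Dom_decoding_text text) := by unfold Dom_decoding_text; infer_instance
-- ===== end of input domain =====

-- B tokenizes the input into (maximal digit run, following char) pairs instead of A's
-- per-character branch with an accumulator string; same cost, different decomposition.

-- ===== PORT A =====
-- A's loop state: (code_list, char_count); Python's int() of an empty count string raises
-- ValueError (ofChars? = none); Pre_ excludes those inputs, so `getD 0` is never relied upon.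
def pvStepA (st : List (List Char) × List Char) (c : Char) : List (List Char) × List Char :=
  if PySem.Chars.isdigit c then (st.1, st.2 ++ [c])
  else (st.1 ++ [PySem.List.pyRepeat [c] ((PySem.Int.ofChars? st.2).getD 0)], [])

def decoding_text (text : String) : String :=
  String.ofList (PySem.Chars.join [] (text.toList.foldl pvStepA ([], [])).1)

-- ===== PORT B =====
-- inner loop `while j < n and text[j].isdigit(): j += 1` plus the slice text[i:j]:
-- returns (the maximal digit-run prefix, the rest of the string)
def pvScanDigits : List Char → List Char × List Char
  | [] => ([], [])
  | c :: tl =>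
    if PySem.Chars.isdigit c then
      ((pvScanDigits tl).1.cons c, (pvScanDigits tl).2)
    else ([], c :: tl)

theorem pvScanDigits_snd_le (l : List Char) : (pvScanDigits l).2.length ≤ l.length := by
  induction l with
  | nil => simp [pvScanDigits]
  | cons c tl ih =>
    simp only [pvScanDigits]
    split
    · simpa using Nat.le_succ_of_le ih
    · simp

-- outer `while i < n` loop of Source B (the `if j == n: break` is the [] branch)
def pvDecodeRuns (l : List Char) : List (List Char) :=
  match h : (pvScanDigits l).2 with
  | [] => []
  | c :: tl =>
    PySem.List.pyRepeat [c] ((PySem.Int.ofChars? (pvScanDigits l).1).getD 0) :: pvDecodeRuns tl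
termination_by l.length
decreasing_by
  have := pvScanDigits_snd_le l
  rw [h] at this
  simp at this; omega

def decoding_text_alt (text : String) : String :=
  String.ofList (PySem.Chars.join [] (pvDecodeRuns text.toList))

-- ===== PRECONDITION & SPEC =====
-- Pre_ excludes exactly the inputs on which A raises ValueError (int() of an empty count
-- string, whenever a non-digit character is not immediately preceded by a digit); B raises there too.
def Pre_decoding_text (text : String) : Prop :=
  text.toList.head?.all (fun c => PySem.Chars.isdigit c) = true ∧
  List.IsChain (fun a b => (PySem.Chars.isdigit a || PySem.Chars.isdigit b) = true) text.toList
instance (text : String) : Decidable (Pre_decoding_text text) := by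
  unfold Pre_decoding_text; infer_instance

def pvWitness_decoding_text : String := "3a12b0c"

def Spec_decoding_text (text : String) (out : String) : Prop := out = decoding_text_alt text
instance (text : String) (out : String) : Decidable (Spec_decoding_text text out) := by unfold Spec_decoding_text; infer_instance

-- ===== CLAIM (what is proved, stated in full; the proofs are below) =====
def Claim_equal_decoding_text : Prop := ∀ (text : String), Dom_decoding_text text → Pre_decoding_text text → Spec_decoding_text text (decoding_text text)

-- ===== LEMMAS AND PROOFS =====

theorem pvScanDigits_eq (l : List Char) :
    pvScanDigits l = (l.takeWhile PySem.Chars.isdigit, l.dropWhile PySem.Chars.isdigit) := by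
  induction l with
  | nil => simp [pvScanDigits]
  | cons c tl ih =>
    simp only [pvScanDigits, List.takeWhile, List.dropWhile]
    by_cases h : PySem.Chars.isdigit c = true <;> simp [h, ih]

theorem pvDecodeRuns_of_nil {l : List Char} (h : (pvScanDigits l).2 = []) :
    pvDecodeRuns l = [] := by
  rw [pvDecodeRuns]; split
  · rfl
  · rename_i c tl h'; rw [h] at h'; exact absurd h' (by simp)

theorem pvDecodeRuns_of_cons {l ds tl : List Char} {c : Char}
    (h : pvScanDigits l = (ds, c :: tl)) :
    pvDecodeRuns l =
      PySem.List.pyRepeat [c] ((PySem.Int.ofChars? ds).getD 0) :: pvDecodeRuns tl := by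
  rw [pvDecodeRuns]; split
  · rename_i h'; rw [h] at h'; exact absurd h' (by simp)
  · rename_i c' tl' h2
    have hfst : (pvScanDigits l).1 = ds := by rw [h]
    have hsnd : c' :: tl' = c :: tl := by rw [← h2, h]
    injection hsnd with h3 h4
    subst h3; subst h4
    rw [hfst]

theorem pv_main (l : List Char) : ∀ (cc : List Char) (acc : List (List Char)),
    (∀ c ∈ cc, PySem.Chars.isdigit c = true) →
    List.IsChain (fun a b => (PySem.Chars.isdigit a || PySem.Chars.isdigit b) = true) (cc ++ l) →
    (cc = [] → l.head?.all (fun c => PySem.Chars.isdigit c) = true) →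
    (l.foldl pvStepA (acc, cc)).1 = acc ++ pvDecodeRuns (cc ++ l) := by
  induction l with
  | nil =>
    intro cc acc hcc hch hhd
    have h2 : (pvScanDigits cc).2 = [] := by
      rw [pvScanDigits_eq]
      exact List.dropWhile_eq_nil_iff.mpr (fun x hx => hcc x hx)
    simp [pvDecodeRuns_of_nil h2]
  | cons c tl ih =>
    intro cc acc hcc hch hhd
    by_cases hd : PySem.Chars.isdigit c = true
    · have hcc' : ∀ x ∈ cc ++ [c], PySem.Chars.isdigit x = true := by
        intro x hx; rcases List.mem_append.mp hx with h | h
        · exact hcc x h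
        · simp at h; subst h; exact hd
      have hkey := ih (cc ++ [c]) acc hcc' (by simpa using hch) (by intro h; simp at h)
      simp only [List.foldl_cons, pvStepA, hd, if_pos] at *
      rw [hkey]
      simp
    · have hccne : cc ≠ [] := by
        intro h; subst h
        have := hhd rfl
        simp [hd] at this
      have hch2 : List.IsChain (fun a b => (PySem.Chars.isdigit a || PySem.Chars.isdigit b) = true) (c :: tl) :=
        hch.suffix ⟨cc, rfl⟩
      have htl_ch : List.IsChain (fun a b => (PySem.Chars.isdigit a || PySem.Chars.isdigit b) = true) tl :=
        (List.isChain_cons.mp hch2).2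
      have htl_hd : tl.head?.all (fun x => PySem.Chars.isdigit x) = true := by
        rcases List.isChain_cons.mp hch2 with ⟨h1, _⟩
        cases htl : tl.head? with
        | none => simp
        | some y =>
          have := h1 y htl
          simp [hd] at this
          simp [this]
      have step1 : ((c :: tl).foldl pvStepA (acc, cc)) =
          tl.foldl pvStepA (acc ++ [PySem.List.pyRepeat [c] ((PySem.Int.ofChars? cc).getD 0)], []) := by
        simp [pvStepA, hd]
      have hscan : pvScanDigits (cc ++ c :: tl) = (cc, c :: tl) := by
        rw [pvScanDigits_eq]
        have h1 : (cc ++ c :: tl).takeWhile PySem.Chars.isdigit = cc := by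
          rw [List.takeWhile_append]
          simp [List.takeWhile_eq_self_iff.mpr hcc, List.takeWhile, hd]
        have h2 : (cc ++ c :: tl).dropWhile PySem.Chars.isdigit = c :: tl := by
          rw [List.dropWhile_append]
          simp [List.dropWhile_eq_nil_iff.mpr (fun x hx => hcc x hx), List.dropWhile, hd]
        rw [h1, h2]
      have hkey := ih [] (acc ++ [PySem.List.pyRepeat [c] ((PySem.Int.ofChars? cc).getD 0)])
        (by simp) (by simpa using htl_ch) (fun _ => htl_hd)
      rw [step1, pvDecodeRuns_of_cons hscan]
      simp only [List.nil_append] at hkey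
      rw [hkey]
      simp

-- ===== VERDICT (by name: the statement is the Claim_ definition above) =====
theorem decoding_text_spec : Claim_equal_decoding_text := by
  intro text _ hpre
  unfold Spec_decoding_text decoding_text decoding_text_alt
  have := pv_main text.toList [] [] (by simp) (by simpa using hpre.2) (fun _ => hpre.1)
  simp only [List.nil_append] at this
  rw [this]
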